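-- pv_equiv track=rewrite | github.com/kshired/Algorithms | programmers/뉴스_클러스터링.py | solution
-- ===== SOURCE A (Python) =====
-- def jakard(set1,set2):
--     mult = 65536
--     a = dict()
--     b = dict()
--     for key in set1.keys():
--         if set2.get(key):
--             a[key] = min(set1[key],set2[key])
--             b[key] = max(set1[key],set2[key])
--         else:
--             b[key] = set1[key]
--
--     for key in set2.keys():
--         if set1.get(key):
--             a[key] = min(set1[key],set2[key])
--             b[key] = max(set1[key],set2[key])
--         else:
--             b[key] = set2[key]
--
--     a = sum([value for value in a.values()])
--     b = sum([value for value in b.values()])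
--
--     if a == 0 and b == 0:
--         return 1*mult
--     else:
--         return (a*mult)//b
--
-- def solution(str1, str2):
--     set_a = dict()
--     set_b = dict()
--
--     for i in range(len(str1)-1):
--         tmp = str1[i:i+2]
--         if tmp[0].isalpha() and tmp[1].isalpha():
--             if set_a.get(tmp.upper()):
--                 set_a[tmp.upper()] += 1
--             else:
--                 set_a[tmp.upper()] = 1
--
--     for i in range(len(str2)-1):
--         tmp = str2[i:i+2]
--         if tmp[0].isalpha() and tmp[1].isalpha():
--             if set_b.get(tmp.upper()):
--                 set_b[tmp.upper()] += 1
--             else: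
--                 set_b[tmp.upper()] = 1
--
--     return jakard(set_a,set_b)
-- ===== SOURCE B (Python) =====
-- def _bigrams(s):
--     return [(x + y).upper() for x, y in zip(s, s[1:])
--             if x.isalpha() and y.isalpha()]
--
-- def solution(str1, str2):
--     ga = sorted(_bigrams(str1))
--     gb = sorted(_bigrams(str2))
--     i = j = inter = 0
--     while i < len(ga) and j < len(gb):
--         if ga[i] == gb[j]:
--             inter += 1
--             i += 1
--             j += 1
--         elif ga[i] < gb[j]:
--             i += 1
--         else:
--             j += 1
--     union = len(ga) + len(gb) - inter
--     return 65536 if union == 0 else inter * 65536 // union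
-- ===== Notes on version B (the rewrite author's own statement) =====
-- stated objective: alternative
-- what changed: B replaces A's dictionary counting and its two min/max key-loops by a sort-and-merge algorithm: it builds the two bigram lists with multiplicity, sorts them, counts the multiset intersection with a single two-pointer merge, and gets the union size as len(ga)+len(gb)-inter.
import Mathlib
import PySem

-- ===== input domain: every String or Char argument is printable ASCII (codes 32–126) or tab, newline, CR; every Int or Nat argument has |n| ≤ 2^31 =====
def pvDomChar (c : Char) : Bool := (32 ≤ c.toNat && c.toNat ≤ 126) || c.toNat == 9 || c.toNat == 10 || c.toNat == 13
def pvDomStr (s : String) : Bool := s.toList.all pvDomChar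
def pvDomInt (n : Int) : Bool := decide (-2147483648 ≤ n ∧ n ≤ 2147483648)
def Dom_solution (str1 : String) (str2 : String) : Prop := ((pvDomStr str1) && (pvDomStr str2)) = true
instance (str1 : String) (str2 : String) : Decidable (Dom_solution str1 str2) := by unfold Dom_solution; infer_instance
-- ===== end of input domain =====

-- B drops A's dictionaries entirely: it sorts the two bigram lists and counts the multiset
-- intersection with a two-pointer merge, union = len+len-inter (objective: alternative algorithm).

-- ===== PORT A =====
-- Python truthiness of the value of `dict.get(key)`: None and 0 are falsy.
def pvTruthy (o : Option Int) : Bool :=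
  match o with
  | none => false
  | some v => v != 0

-- the 2-gram counting loop of A's `solution` (run once for str1, once for str2);
-- tmp[0]/tmp[1] are read through the pattern: for every i in range(len(s)-1) the slice
-- s[i:i+2] has exactly two characters, so the wildcard branch is unreachable.
def pvCount (s : List Char) : PySem.Dict (List Char) Int :=
  (PySem.List.pyRange 0 (PySem.List.len s - 1) 1).foldl (fun d i =>
    let tmp := PySem.List.slice s (some i) (some (i + 2))
    match tmp with
    | [c0, c1] =>
      if PySem.Chars.isalpha c0 && PySem.Chars.isalpha c1 then
        let key := PySem.Chars.upper tmp
        if pvTruthy (d.get? key) then d.insert key (d.getD key 0 + 1)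
        else d.insert key 1
      else d
    | _ => d) PySem.Dict.empty

-- A's jakard; set1[key]/set2[key] read as getD (the key is present wherever they are read).
def pvJakard (set1 set2 : PySem.Dict (List Char) Int) : Int :=
  let mult : Int := 65536
  let ab :=
    set1.keys.foldl
      (fun (p : PySem.Dict (List Char) Int × PySem.Dict (List Char) Int) key =>
        if pvTruthy (set2.get? key) then
          (p.1.insert key (min (set1.getD key 0) (set2.getD key 0)),
           p.2.insert key (max (set1.getD key 0) (set2.getD key 0)))
        else
          (p.1, p.2.insert key (set1.getD key 0)))
      (PySem.Dict.empty, PySem.Dict.empty)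
  let ab2 :=
    set2.keys.foldl
      (fun p key =>
        if pvTruthy (set1.get? key) then
          (p.1.insert key (min (set1.getD key 0) (set2.getD key 0)),
           p.2.insert key (max (set1.getD key 0) (set2.getD key 0)))
        else
          (p.1, p.2.insert key (set2.getD key 0)))
      ab
  let a := (ab2.1.values.map (fun v => v)).sum
  let b := (ab2.2.values.map (fun v => v)).sum
  if a = 0 ∧ b = 0 then 1 * mult
  else PySem.Int.floordiv (a * mult) b

def solution (str1 : String) (str2 : String) : Int :=
  pvJakard (pvCount str1.toList) (pvCount str2.toList)

-- ===== PORT B =====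
-- B's _bigrams: the list (with multiplicity) of uppercased alphabetic 2-grams of s.
def pvBigrams (s : List Char) : List (List Char) :=
  ((s.zip (PySem.List.slice s (some 1) none)).filter
      (fun xy => PySem.Chars.isalpha xy.1 && PySem.Chars.isalpha xy.2)).map
    (fun xy => PySem.Chars.upper [xy.1, xy.2])

-- B's while-loop: two-pointer merge over the two sorted lists, counting matches;
-- the recursion is on the suffixes ga[i:], gb[j:].
def pvMergeCount : List (List Char) → List (List Char) → Int
  | [], _ => 0
  | _ :: _, [] => 0
  | p :: t1, q :: t2 =>
    if p = q then 1 + pvMergeCount t1 t2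
    else if p < q then pvMergeCount t1 (q :: t2)
    else pvMergeCount (p :: t1) t2
termination_by l1 l2 => l1.length + l2.length

def solution_alt (str1 : String) (str2 : String) : Int :=
  let ga := PySem.List.sorted (pvBigrams str1.toList) (fun x => x) false
  let gb := PySem.List.sorted (pvBigrams str2.toList) (fun x => x) false
  let inter := pvMergeCount ga gb
  let union := PySem.List.len ga + PySem.List.len gb - inter
  if union = 0 then 65536 else PySem.Int.floordiv (inter * 65536) union

-- ===== PRECONDITION & SPEC =====
def Spec_solution (str1 : String) (str2 : String) (out : Int) : Prop := out = solution_alt str1 str2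
instance (str1 : String) (str2 : String) (out : Int) : Decidable (Spec_solution str1 str2 out) := by unfold Spec_solution; infer_instance

-- ===== CLAIM (what is proved, stated in full; the proofs are below) =====
def Claim_equal_solution : Prop := ∀ (str1 : String) (str2 : String), Dom_solution str1 str2 → Spec_solution str1 str2 (solution str1 str2)

-- ===== LEMMAS AND PROOFS =====

theorem pv_windows (s : List Char) :
    (PySem.List.pyRange 0 ((s.length : Int) - 1) 1).map
        (fun i => PySem.List.slice s (some i) (some (i + 2)))
      = (s.zip s.tail).map (fun p => [p.1, p.2]) := by
  apply List.ext_getElem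
  · simp [PySem.List.length_pyRange_one]
  · intro k h1 h2
    simp only [List.getElem_map, PySem.List.getElem_pyRange_one]
    have hk : k + 1 < s.length := by
      simp [PySem.List.length_pyRange_one] at h1; omega
    have e2 : (0 : Int) + (k : Int) + 2 = (((k + 2 : Nat)) : Int) := by push_cast; ring
    rw [show (0 : Int) + (k : Int) = ((k : Nat) : Int) by omega] at e2 ⊢
    rw [e2, PySem.List.slice_natCast]
    rw [Nat.add_sub_cancel_left,
        List.drop_eq_getElem_cons (show k < s.length by omega),
        List.drop_eq_getElem_cons hk,
        show (2:Nat) = 1 + 1 from rfl, List.take_succ_cons, List.take_succ_cons, List.take_zero]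
    simp [List.getElem_zip, List.getElem_tail]

theorem pvCount_eq_counter (s : List Char) :
    pvCount s = PySem.Dict.counter (pvBigrams s) := by
  have h1 : pvCount s =
      ((PySem.List.pyRange 0 ((s.length : Int) - 1) 1).map
        (fun i => PySem.List.slice s (some i) (some (i + 2)))).foldl
        (fun d tmp =>
          match tmp with
          | [c0, c1] =>
            if PySem.Chars.isalpha c0 && PySem.Chars.isalpha c1 then
              let key := PySem.Chars.upper tmp
              if pvTruthy (d.get? key) then d.insert key (d.getD key 0 + 1)
              else d.insert key 1
            else d
          | _ => d) PySem.Dict.empty := by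
    unfold pvCount
    rw [PySem.List.len_eq, List.foldl_map]
  rw [h1, pv_windows, List.foldl_map]
  unfold pvBigrams
  rw [← PySem.Dict.foldl_insert_getD_add_one_eq_counter, List.foldl_map,
      PySem.List.slice_from_one, ← PySem.List.foldl_if_eq_foldl_filter]
  apply PySem.List.foldl_congr_mem
  intro d p _
  show (if PySem.Chars.isalpha p.1 && PySem.Chars.isalpha p.2 then
          let key := PySem.Chars.upper [p.1, p.2]
          if pvTruthy (d.get? key) then d.insert key (d.getD key 0 + 1)
          else d.insert key 1
        else d) = _
  by_cases ha : (PySem.Chars.isalpha p.1 && PySem.Chars.isalpha p.2) = true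
  · simp only [ha, if_true]
    set key := PySem.Chars.upper [p.1, p.2] with hkey
    rcases hg : d.get? key with _ | v
    · have h0 : d.getD key 0 = 0 := by
        rw [PySem.Dict.getD_eq_get?_getD, hg]; rfl
      simp [pvTruthy, h0]
    · by_cases hv : v = 0
      · have h0 : d.getD key 0 = 0 := by
          rw [PySem.Dict.getD_eq_get?_getD, hg, hv]; rfl
        simp [pvTruthy, hv, h0]
      · simp [pvTruthy, hv]
  · simp [ha]

-- ===== counter facts used on the A side =====
theorem pv_counter_get?_pos (L : List (List Char)) :
    ∀ k v, (PySem.Dict.counter L).get? k = some v → 1 ≤ v := by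
  intro k v hg
  have hk : k ∈ (PySem.Dict.counter L).keys := by
    by_contra hc
    rw [← PySem.Dict.get?_eq_none_iff_not_mem_keys] at hc
    rw [hc] at hg; cases hg
  rw [PySem.Dict.keys_counter] at hk
  have hmem : k ∈ L := (PySem.Set.mem_ofList _ _).mp hk
  have hD : (PySem.Dict.counter L).getD k 0 = v := by
    rw [PySem.Dict.getD_eq_get?_getD, hg]; rfl
  rw [PySem.Dict.getD_counter] at hD
  have : 0 < L.count k := List.count_pos_iff.mpr hmem
  omega

theorem pv_truthy_counter (L : List (List Char)) (k : List Char) :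
    pvTruthy ((PySem.Dict.counter L).get? k) = decide (k ∈ L) := by
  rcases hg : (PySem.Dict.counter L).get? k with _ | v
  · rw [PySem.Dict.get?_eq_none_iff_not_mem_keys, PySem.Dict.keys_counter] at hg
    have : ¬ k ∈ L := fun h => hg ((PySem.Set.mem_ofList _ _).mpr h)
    simp [pvTruthy, this]
  · have h1 := pv_counter_get?_pos L k v hg
    have hk : k ∈ (PySem.Dict.counter L).keys := by
      by_contra hc
      rw [← PySem.Dict.get?_eq_none_iff_not_mem_keys] at hc
      rw [hc] at hg; cases hg
    rw [PySem.Dict.keys_counter] at hk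
    have hmem : k ∈ L := (PySem.Set.mem_ofList _ _).mp hk
    simp [pvTruthy, hmem]; omega

-- List.count with the Dict's BEq instance is List.count with the DecidableEq-derived one
theorem pv_count_inst (x : List Char) (L : List (List Char)) :
    @List.count (List Char) List.instBEq x L = @List.count (List Char) instBEqOfDecidableEq x L := by
  induction L with
  | nil => rfl
  | cons a t ih => simp [List.count_cons, ih]

-- the two DecidableLT instances on List Char give the same sorted list
theorem pv_sorted_irrel (L : List (List Char)) :
    PySem.List.sorted L (fun x => x) false
      = @PySem.List.sorted (List Char) (List Char) _
          (@LinearOrder.toDecidableLT (List Char) List.instLinearOrder) L (fun x => x) false := by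
  congr 1

theorem pv_ofList_toFinset (L : List (List Char)) :
    (PySem.Set.ofList L).toFinset = L.toFinset := by
  ext k
  simp [List.mem_toFinset, PySem.Set.mem_ofList]

-- sum of per-key minima over the common keys IS the size of the multiset intersection
theorem pv_counter_inter_sum (L1 L2 : List (List Char)) :
    (((PySem.Dict.counter L1).keys.filter
        (fun k => pvTruthy ((PySem.Dict.counter L2).get? k))).map
      (fun k => min ((PySem.Dict.counter L1).getD k 0) ((PySem.Dict.counter L2).getD k 0))).sum
    = (((↑L1 : Multiset (List Char)) ∩ ↑L2).card : Int) := by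
  have hfun : ∀ k, min ((PySem.Dict.counter L1).getD k 0) ((PySem.Dict.counter L2).getD k 0)
      = ((min (L1.count k) (L2.count k) : Nat) : Int) := by
    intro k
    rw [PySem.Dict.getD_counter, PySem.Dict.getD_counter]
    push_cast
    rfl
  rw [PySem.Dict.keys_counter]
  rw [List.map_congr_left (fun k _ => hfun k)]
  have hsum : ∀ (l : List (List Char)) (f : List Char → Nat),
      (l.map (fun k => ((f k : Nat) : Int))).sum = ((l.map f).sum : Int) := by
    intro l f; induction l with
    | nil => simp
    | cons a t ih => simp [ih]
  rw [hsum]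
  have hnd : ((PySem.Set.ofList L1).filter
      (fun k => pvTruthy ((PySem.Dict.counter L2).get? k))).Nodup :=
    (PySem.Set.nodup_ofList L1).filter _
  rw [← List.sum_toFinset _ hnd]
  have hfs : ((PySem.Set.ofList L1).filter
        (fun k => pvTruthy ((PySem.Dict.counter L2).get? k))).toFinset
      = L1.toFinset ∩ L2.toFinset := by
    ext k
    simp only [List.mem_toFinset, List.mem_filter, Finset.mem_inter, PySem.Set.mem_ofList,
      pv_truthy_counter]
    simp
  rw [hfs]
  have hcard := Multiset.toFinset_sum_count_eq ((↑L1 : Multiset (List Char)) ∩ ↑L2)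
  rw [Multiset.toFinset_inter] at hcard
  simp only [Multiset.count_inter, Multiset.coe_count] at hcard
  simp only [pv_count_inst]
  rw [← Nat.cast_inj (R := Int)] at hcard
  push_cast at hcard ⊢
  exact hcard

-- the values of Counter(L) sum to len(L)
theorem pv_counter_values_sum (L : List (List Char)) :
    (PySem.Dict.counter L).values.sum = (L.length : Int) := by
  rw [PySem.Dict.values_eq_map_keys _ (PySem.Dict.nodup_keys_counter L) 0,
      PySem.Dict.keys_counter]
  have : (PySem.Set.ofList L).map (fun k => (PySem.Dict.counter L).getD k 0)
      = (PySem.Set.ofList L).map (fun k => ((L.count k : Nat) : Int)) :=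
    List.map_congr_left (fun k _ => PySem.Dict.getD_counter L k)
  rw [this]
  have hsum : ∀ (l : List (List Char)) (f : List Char → Nat),
      (l.map (fun k => ((f k : Nat) : Int))).sum = ((l.map f).sum : Int) := by
    intro l f; induction l with
    | nil => simp
    | cons a t ih => simp [ih]
  rw [hsum, ← List.sum_toFinset _ (PySem.Set.nodup_ofList L), pv_ofList_toFinset]
  have hcard := Multiset.toFinset_sum_count_eq (↑L : Multiset (List Char))
  simp only [Multiset.coe_count, Multiset.coe_card] at hcard
  simp only [pv_count_inst]
  exact_mod_cast hcard

-- ===== generic sum helpers =====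
theorem pv_sum_map_sub (l : List (List Char)) (f g : List Char → Int) :
    (l.map (fun x => f x - g x)).sum = (l.map f).sum - (l.map g).sum := by
  induction l with
  | nil => simp
  | cons a t ih => simp [ih]; ring

theorem pv_sum_map_ite (l : List (List Char)) (p : List Char → Bool) (f : List Char → Int) :
    (l.map (fun k => if p k then f k else 0)).sum = ((l.filter p).map f).sum := by
  induction l with
  | nil => simp
  | cons a t ih => by_cases h : p a <;> simp [h, ih]

theorem pv_sum_filter_split (l : List (List Char)) (p : List Char → Bool) (f : List Char → Int) :
    (l.map f).sum = ((l.filter p).map f).sum + ((l.filter (fun x => !p x)).map f).sum := by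
  induction l with
  | nil => simp
  | cons a t ih => by_cases h : p a <;> simp [h, ih] <;> ring

theorem pv_foldl_fixed {α β : Type} (l : List α) (f : β → α → β) (d : β)
    (h : ∀ x ∈ l, f d x = d) : l.foldl f d = d := by
  induction l with
  | nil => rfl
  | cons a t ih =>
    simp only [List.foldl_cons, h a (by simp)]
    exact ih (fun x hx => h x (by simp [hx]))

theorem pv_insert_get_self (d : PySem.Dict (List Char) Int) (k : List Char) (v : Int)
    (hnd : d.keys.Nodup) (h : d.get? k = some v) : d.insert k v = d := by
  apply PySem.Dict.ext
  rw [PySem.Dict.items_insert_of_contains]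
  · conv_rhs => rw [← List.map_id d.items]
    apply List.map_congr_left
    intro p hp
    by_cases hk : p.1 == k
    · have hp1 : p.1 = k := by simpa using hk
      have hg := PySem.Dict.get?_of_mem_items d (k := p.1) (v := p.2) (by simpa using hp) hnd
      rw [hp1, h] at hg
      simp only [id]
      rw [if_pos hk, ← hp1, Option.some_inj.mp hg]
    · simp [hk]
  · simp [PySem.Dict.contains_eq_isSome_get?, h]

-- loop 2's effect on the max-dict: overwrite of an identical value on common keys, append on fresh keys
theorem pv_loop2_items (M gb : List Char → Int) (cA : List Char → Bool) :
    ∀ (l : List (List Char)) (d : PySem.Dict (List Char) Int), l.Nodup → d.keys.Nodup →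
    (∀ k ∈ l, cA k = true → d.get? k = some (M k)) →
    (∀ k ∈ l, cA k = false → d.get? k = none) →
    (l.foldl (fun d k => if cA k then d.insert k (M k) else d.insert k (gb k)) d).items
      = d.items ++ (l.filter (fun k => !cA k)).map (fun k => (k, gb k)) := by
  intro l
  induction l with
  | nil => intro d _ _ _ _; simp
  | cons a t ih =>
    intro d hl hd h1 h2
    simp only [List.foldl_cons]
    rcases hca : cA a with _ | _
    · -- fresh key: the insert appends
      rw [if_neg (by simp)]
      have hni : d.contains a = false := by
        simp [PySem.Dict.contains_eq_isSome_get?, h2 a (by simp) hca]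
      rw [ih (d.insert a (gb a)) (by exact (List.nodup_cons.mp hl).2)
            (PySem.Dict.nodup_keys_insert d a (gb a) hd)
            (fun k hk hc => by
              have hne : k ≠ a := fun he => (List.nodup_cons.mp hl).1 (he ▸ hk)
              rw [PySem.Dict.get?_insert, if_neg hne]
              exact h1 k (by simp [hk]) hc)
            (fun k hk hc => by
              have hne : k ≠ a := fun he => (List.nodup_cons.mp hl).1 (he ▸ hk)
              rw [PySem.Dict.get?_insert, if_neg hne]
              exact h2 k (by simp [hk]) hc)]
      rw [PySem.Dict.items_insert_of_not_contains d (gb a) hni]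
      simp [hca]
    · -- common key: insert of the value already stored, a no-op
      rw [if_pos rfl,
          pv_insert_get_self d a (M a) hd (h1 a (by simp) hca)]
      rw [ih d (List.nodup_cons.mp hl).2 hd
            (fun k hk hc => h1 k (by simp [hk]) hc)
            (fun k hk hc => h2 k (by simp [hk]) hc)]
      simp [hca]

theorem pvJakard_eq (a b : PySem.Dict (List Char) Int)
    (ha : a.keys.Nodup) (hb : b.keys.Nodup)
    (hpa : ∀ k v, a.get? k = some v → 1 ≤ v) (hpb : ∀ k v, b.get? k = some v → 1 ≤ v) :
    pvJakard a b =
      (if (a.values.sum + b.values.sum -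
            ((a.keys.filter (fun k => pvTruthy (b.get? k))).map
              (fun k => min (a.getD k 0) (b.getD k 0))).sum) = 0
       then 65536
       else PySem.Int.floordiv
         ((((a.keys.filter (fun k => pvTruthy (b.get? k))).map
              (fun k => min (a.getD k 0) (b.getD k 0))).sum) * 65536)
         (a.values.sum + b.values.sum -
            ((a.keys.filter (fun k => pvTruthy (b.get? k))).map
              (fun k => min (a.getD k 0) (b.getD k 0))).sum)) := by
  -- truthiness of get? is membership in the keys, counters being ≥ 1
  have hmemA : ∀ k, pvTruthy (a.get? k) = true ↔ k ∈ a.keys := by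
    intro k
    rcases hg : a.get? k with _ | v
    · rw [PySem.Dict.get?_eq_none_iff_not_mem_keys] at hg
      simp [pvTruthy, hg]
    · have h1 := hpa _ _ hg
      have h2 : k ∈ a.keys := by
        by_contra hcon
        rw [← PySem.Dict.get?_eq_none_iff_not_mem_keys] at hcon
        rw [hcon] at hg; simp at hg
      simp [pvTruthy, h2]; omega
  have hmemB : ∀ k, pvTruthy (b.get? k) = true ↔ k ∈ b.keys := by
    intro k
    rcases hg : b.get? k with _ | v
    · rw [PySem.Dict.get?_eq_none_iff_not_mem_keys] at hg
      simp [pvTruthy, hg]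
    · have h1 := hpb _ _ hg
      have h2 : k ∈ b.keys := by
        by_contra hcon
        rw [← PySem.Dict.get?_eq_none_iff_not_mem_keys] at hcon
        rw [hcon] at hg; simp at hg
      simp [pvTruthy, h2]; omega
  have hga : ∀ k ∈ a.keys, 1 ≤ a.getD k 0 := by
    intro k hk
    rcases hg : a.get? k with _ | v
    · rw [PySem.Dict.get?_eq_none_iff_not_mem_keys] at hg; exact absurd hk hg
    · rw [PySem.Dict.getD_eq_get?_getD, hg]; exact hpa _ _ hg
  have hgb : ∀ k ∈ b.keys, 1 ≤ b.getD k 0 := by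
    intro k hk
    rcases hg : b.get? k with _ | v
    · rw [PySem.Dict.get?_eq_none_iff_not_mem_keys] at hg; exact absurd hk hg
    · rw [PySem.Dict.getD_eq_get?_getD, hg]; exact hpb _ _ hg
  -- split the two pair-folds into four independent dictionary folds
  have hsplit1 : (fun (p : PySem.Dict (List Char) Int × PySem.Dict (List Char) Int) key =>
      if pvTruthy (b.get? key) then
        (p.1.insert key (min (a.getD key 0) (b.getD key 0)),
         p.2.insert key (max (a.getD key 0) (b.getD key 0)))
      else (p.1, p.2.insert key (a.getD key 0)))
    = fun p key =>
      ((fun (d : PySem.Dict (List Char) Int) key =>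
          if pvTruthy (b.get? key) then d.insert key (min (a.getD key 0) (b.getD key 0)) else d) p.1 key,
       (fun (d : PySem.Dict (List Char) Int) key =>
          if pvTruthy (b.get? key) then d.insert key (max (a.getD key 0) (b.getD key 0))
          else d.insert key (a.getD key 0)) p.2 key) := by
    funext p key; by_cases h : pvTruthy (b.get? key) <;> simp [h]
  have hsplit2 : (fun (p : PySem.Dict (List Char) Int × PySem.Dict (List Char) Int) key =>
      if pvTruthy (a.get? key) then
        (p.1.insert key (min (a.getD key 0) (b.getD key 0)),
         p.2.insert key (max (a.getD key 0) (b.getD key 0)))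
      else (p.1, p.2.insert key (b.getD key 0)))
    = fun p key =>
      ((fun (d : PySem.Dict (List Char) Int) key =>
          if pvTruthy (a.get? key) then d.insert key (min (a.getD key 0) (b.getD key 0)) else d) p.1 key,
       (fun (d : PySem.Dict (List Char) Int) key =>
          if pvTruthy (a.get? key) then d.insert key (max (a.getD key 0) (b.getD key 0))
          else d.insert key (b.getD key 0)) p.2 key) := by
    funext p key; by_cases h : pvTruthy (a.get? key) <;> simp [h]
  simp only [pvJakard]
  rw [hsplit1, PySem.List.foldl_prod_mk
        (f := fun (d : PySem.Dict (List Char) Int) key =>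
          if pvTruthy (b.get? key) then d.insert key (min (a.getD key 0) (b.getD key 0)) else d)
        (g := fun (d : PySem.Dict (List Char) Int) key =>
          if pvTruthy (b.get? key) then d.insert key (max (a.getD key 0) (b.getD key 0))
          else d.insert key (a.getD key 0))]
  rw [hsplit2, PySem.List.foldl_prod_mk
        (f := fun (d : PySem.Dict (List Char) Int) key =>
          if pvTruthy (a.get? key) then d.insert key (min (a.getD key 0) (b.getD key 0)) else d)
        (g := fun (d : PySem.Dict (List Char) Int) key =>
          if pvTruthy (a.get? key) then d.insert key (max (a.getD key 0) (b.getD key 0))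
          else d.insert key (b.getD key 0))]
  simp only [List.map_id']
  have hemp : (PySem.Dict.empty : PySem.Dict (List Char) Int).items = [] := rfl
  -- items of the four folds
  have hda1 : (a.keys.foldl (fun (d : PySem.Dict (List Char) Int) key =>
        if pvTruthy (b.get? key) then d.insert key (min (a.getD key 0) (b.getD key 0)) else d)
        PySem.Dict.empty).items
      = (a.keys.filter (fun k => pvTruthy (b.get? k))).map
          (fun k => (k, min (a.getD k 0) (b.getD k 0))) := by
    rw [PySem.List.foldl_if_eq_foldl_filter (p := fun k => pvTruthy (b.get? k))
          (f := fun (d : PySem.Dict (List Char) Int) k => d.insert k (min (a.getD k 0) (b.getD k 0)))]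
    rw [PySem.Dict.items_foldl_insert_fresh _ (fun k => k)
          (fun k => min (a.getD k 0) (b.getD k 0)) PySem.Dict.empty
          (fun x _ => PySem.Dict.contains_empty x) (by simpa using ha.filter _)]
    simp [hemp]
  have hdb1 : (a.keys.foldl (fun (d : PySem.Dict (List Char) Int) key =>
        if pvTruthy (b.get? key) then d.insert key (max (a.getD key 0) (b.getD key 0))
        else d.insert key (a.getD key 0)) PySem.Dict.empty).items
      = a.keys.map (fun k => (k,
          if pvTruthy (b.get? k) then max (a.getD k 0) (b.getD k 0) else a.getD k 0)) := by
    rw [show (fun (d : PySem.Dict (List Char) Int) key =>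
        if pvTruthy (b.get? key) then d.insert key (max (a.getD key 0) (b.getD key 0))
        else d.insert key (a.getD key 0))
      = fun (d : PySem.Dict (List Char) Int) key => d.insert key
          (if pvTruthy (b.get? key) then max (a.getD key 0) (b.getD key 0) else a.getD key 0) by
        funext d key; split <;> rfl]
    rw [PySem.Dict.items_foldl_insert_fresh a.keys (fun k => k)
          (fun k => if pvTruthy (b.get? k) then max (a.getD k 0) (b.getD k 0) else a.getD k 0)
          PySem.Dict.empty (fun x _ => PySem.Dict.contains_empty x) (by simpa using ha)]
    simp [hemp]
  have hkeys : ∀ (d : PySem.Dict (List Char) Int), d.keys = d.items.map (·.1) := fun _ => rfl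
  have hvalues : ∀ (d : PySem.Dict (List Char) Int), d.values = d.items.map (·.2) := fun _ => rfl
  have hk_da1 : (a.keys.foldl (fun (d : PySem.Dict (List Char) Int) key =>
        if pvTruthy (b.get? key) then d.insert key (min (a.getD key 0) (b.getD key 0)) else d)
        PySem.Dict.empty).keys = a.keys.filter (fun k => pvTruthy (b.get? k)) := by
    rw [hkeys, hda1]; simp [Function.comp_def]
  have hk_db1 : (a.keys.foldl (fun (d : PySem.Dict (List Char) Int) key =>
        if pvTruthy (b.get? key) then d.insert key (max (a.getD key 0) (b.getD key 0))
        else d.insert key (a.getD key 0)) PySem.Dict.empty).keys = a.keys := by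
    rw [hkeys, hdb1]; simp [Function.comp_def]
  -- the second loop leaves the min-dict unchanged
  have hda2 : b.keys.foldl (fun (d : PySem.Dict (List Char) Int) key =>
        if pvTruthy (a.get? key) then d.insert key (min (a.getD key 0) (b.getD key 0)) else d)
        (a.keys.foldl (fun (d : PySem.Dict (List Char) Int) key =>
          if pvTruthy (b.get? key) then d.insert key (min (a.getD key 0) (b.getD key 0)) else d)
          PySem.Dict.empty)
      = a.keys.foldl (fun (d : PySem.Dict (List Char) Int) key =>
          if pvTruthy (b.get? key) then d.insert key (min (a.getD key 0) (b.getD key 0)) else d)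
          PySem.Dict.empty := by
    apply pv_foldl_fixed
    intro k hk
    by_cases hcak : pvTruthy (a.get? k) = true
    · rw [if_pos hcak]
      apply pv_insert_get_self _ _ _ (by rw [hk_da1]; exact ha.filter _)
      refine PySem.Dict.get?_of_mem_items _ ?_ (by rw [hk_da1]; exact ha.filter _)
      rw [hda1]
      exact List.mem_map.mpr ⟨k, List.mem_filter.mpr ⟨(hmemA k).mp hcak, (hmemB k).mpr hk⟩, rfl⟩
    · rw [if_neg hcak]
  -- the second loop appends the b-only keys to the max-dict
  have hdb2 : (b.keys.foldl (fun (d : PySem.Dict (List Char) Int) key =>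
        if pvTruthy (a.get? key) then d.insert key (max (a.getD key 0) (b.getD key 0))
        else d.insert key (b.getD key 0))
        (a.keys.foldl (fun (d : PySem.Dict (List Char) Int) key =>
          if pvTruthy (b.get? key) then d.insert key (max (a.getD key 0) (b.getD key 0))
          else d.insert key (a.getD key 0)) PySem.Dict.empty)).items
      = a.keys.map (fun k => (k,
          if pvTruthy (b.get? k) then max (a.getD k 0) (b.getD k 0) else a.getD k 0))
        ++ (b.keys.filter (fun k => !pvTruthy (a.get? k))).map (fun k => (k, b.getD k 0)) := by
    rw [pv_loop2_items (fun k => max (a.getD k 0) (b.getD k 0)) (fun k => b.getD k 0)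
          (fun k => pvTruthy (a.get? k)) b.keys _ hb (by rw [hk_db1]; exact ha)
          (fun k hk hcak => by
            rw [PySem.Dict.get?_of_mem_items _
                  (by rw [hdb1]
                      exact List.mem_map.mpr ⟨k, (hmemA k).mp hcak, rfl⟩)
                  (by rw [hk_db1]; exact ha)]
            rw [if_pos ((hmemB k).mpr hk)])
          (fun k hk hcak => by
            rw [PySem.Dict.get?_eq_none_iff_not_mem_keys, hk_db1]
            intro hmem
            exact absurd ((hmemA k).mpr hmem) (by simp [hcak]))]
    rw [hdb1]
  -- value sums of the two result dicts
  have hvalsum1 : (a.keys.foldl (fun (d : PySem.Dict (List Char) Int) key =>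
        if pvTruthy (b.get? key) then d.insert key (min (a.getD key 0) (b.getD key 0)) else d)
        PySem.Dict.empty).values.sum
      = ((a.keys.filter (fun k => pvTruthy (b.get? k))).map
          (fun k => min (a.getD k 0) (b.getD k 0))).sum := by
    rw [hvalues, hda1]; simp [Function.comp_def]
  have hvalsum2 : (b.keys.foldl (fun (d : PySem.Dict (List Char) Int) key =>
        if pvTruthy (a.get? key) then d.insert key (max (a.getD key 0) (b.getD key 0))
        else d.insert key (b.getD key 0))
        (a.keys.foldl (fun (d : PySem.Dict (List Char) Int) key =>
          if pvTruthy (b.get? key) then d.insert key (max (a.getD key 0) (b.getD key 0))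
          else d.insert key (a.getD key 0)) PySem.Dict.empty)).values.sum
      = (a.keys.map (fun k =>
            if pvTruthy (b.get? k) then max (a.getD k 0) (b.getD k 0) else a.getD k 0)).sum
        + ((b.keys.filter (fun k => !pvTruthy (a.get? k))).map (fun k => b.getD k 0)).sum := by
    rw [hvalues, hdb2]; simp [Function.comp_def]
  rw [hda2, hvalsum1, hvalsum2]
  -- names for the five sums
  set I := ((a.keys.filter (fun k => pvTruthy (b.get? k))).map
      (fun k => min (a.getD k 0) (b.getD k 0))).sum with hIdef
  set SV := (a.keys.map (fun k =>
      if pvTruthy (b.get? k) then max (a.getD k 0) (b.getD k 0) else a.getD k 0)).sum with hSVdef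
  set SR := ((b.keys.filter (fun k => !pvTruthy (a.get? k))).map (fun k => b.getD k 0)).sum with hSRdef
  have hS1 : a.values.sum = (a.keys.map (fun k => a.getD k 0)).sum := by
    rw [PySem.Dict.values_eq_map_keys a ha 0]
  have hS2 : b.values.sum = (b.keys.map (fun k => b.getD k 0)).sum := by
    rw [PySem.Dict.values_eq_map_keys b hb 0]
  rw [hS1, hS2]
  set S1 := (a.keys.map (fun k => a.getD k 0)).sum with hS1def
  set S2 := (b.keys.map (fun k => b.getD k 0)).sum with hS2def
  -- union identity: SV + SR = S1 + S2 - I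
  have hVsum : SV = S1 + ((a.keys.filter (fun k => pvTruthy (b.get? k))).map
      (fun k => b.getD k 0)).sum - I := by
    rw [hSVdef, hS1def, hIdef]
    rw [show (a.keys.map (fun k =>
          if pvTruthy (b.get? k) then max (a.getD k 0) (b.getD k 0) else a.getD k 0))
        = a.keys.map (fun k => a.getD k 0
            + (if pvTruthy (b.get? k) then b.getD k 0 - min (a.getD k 0) (b.getD k 0) else 0)) by
      apply List.map_congr_left
      intro k _
      by_cases hc : pvTruthy (b.get? k) = true
      · simp [hc]; omega
      · simp [hc]]
    rw [PySem.List.sum_map_add_int, pv_sum_map_ite, pv_sum_map_sub]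
    ring
  have hperm : ((a.keys.filter (fun k => pvTruthy (b.get? k))).map (fun k => b.getD k 0)).sum
      = ((b.keys.filter (fun k => pvTruthy (a.get? k))).map (fun k => b.getD k 0)).sum := by
    have hp : (a.keys.filter (fun k => pvTruthy (b.get? k))).Perm
        (b.keys.filter (fun k => pvTruthy (a.get? k))) := by
      rw [List.perm_ext_iff_of_nodup (ha.filter _) (hb.filter _)]
      intro k; simp only [List.mem_filter]
      constructor
      · rintro ⟨hka, hkb⟩; exact ⟨(hmemB k).mp hkb, (hmemA k).mpr hka⟩
      · rintro ⟨hkb, hka⟩; exact ⟨(hmemA k).mp hka, (hmemB k).mpr hkb⟩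
    exact (hp.map _).sum_eq
  have hsplitB : S2 = ((b.keys.filter (fun k => pvTruthy (a.get? k))).map
      (fun k => b.getD k 0)).sum + SR := by
    rw [hS2def, hSRdef]; exact pv_sum_filter_split _ _ _
  have hU : S1 + S2 - I = SV + SR := by omega
  rw [hU]
  -- positivity of both value lists of the max-dict
  have hpos1 : ∀ x ∈ a.keys.map (fun k =>
      if pvTruthy (b.get? k) then max (a.getD k 0) (b.getD k 0) else a.getD k 0), 0 < x := by
    intro x hx
    rcases List.mem_map.mp hx with ⟨k, hk, rfl⟩
    have := hga k hk
    by_cases hc : pvTruthy (b.get? k) = true <;> simp [hc] <;> omega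
  have hpos2 : ∀ x ∈ (b.keys.filter (fun k => !pvTruthy (a.get? k))).map
      (fun k => b.getD k 0), 0 < x := by
    intro x hx
    rcases List.mem_map.mp hx with ⟨k, hk, rfl⟩
    have := hgb k (List.mem_filter.mp hk).1
    omega
  by_cases hz : SV + SR = 0
  · have hSV0 : SV = 0 := by
      have n1 : 0 ≤ SV := by rw [hSVdef]; exact List.sum_nonneg (fun x hx => le_of_lt (hpos1 x hx))
      have n2 : 0 ≤ SR := by rw [hSRdef]; exact List.sum_nonneg (fun x hx => le_of_lt (hpos2 x hx))
      omega
    have hAnil : a.keys = [] := by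
      by_contra hne
      have := List.sum_pos _ hpos1 (fun hc => hne (List.map_eq_nil_iff.mp hc))
      rw [← hSVdef] at this; omega
    have hI0 : I = 0 := by rw [hIdef, hAnil]; simp
    rw [if_pos ⟨hI0, hz⟩, if_pos hz]
    norm_num
  · rw [if_neg (fun hc => hz hc.2), if_neg hz]

-- ===== B side: the merge over two sorted lists counts the multiset intersection =====
theorem pv_merge_card (l1 l2 : List (List Char))
    (h1 : l1.Pairwise (· ≤ ·)) (h2 : l2.Pairwise (· ≤ ·)) :
    pvMergeCount l1 l2 = (((↑l1 : Multiset (List Char)) ∩ ↑l2).card : Int) := by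
  induction l1, l2 using pvMergeCount.induct with
  | case1 x => simp [pvMergeCount]
  | case2 h t => simp [pvMergeCount]
  | case3 t1 q t2 ih =>
    have e : pvMergeCount (q :: t1) (q :: t2) = 1 + pvMergeCount t1 t2 := by
      simp [pvMergeCount]
    rw [e, ih (List.Pairwise.sublist (List.sublist_cons_self q t1) h1)
          (List.Pairwise.sublist (List.sublist_cons_self q t2) h2)]
    have : ((↑(q :: t1) : Multiset (List Char)) ∩ ↑(q :: t2))
        = q ::ₘ ((↑t1 : Multiset (List Char)) ∩ ↑t2) := by
      rw [← Multiset.cons_coe, ← Multiset.cons_coe,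
          Multiset.cons_inter_of_pos _ (Multiset.mem_cons_self q _),
          Multiset.erase_cons_head]
    rw [this, Multiset.card_cons]
    push_cast; ring
  | case4 p t1 q t2 hne hlt ih =>
    have e : pvMergeCount (p :: t1) (q :: t2) = pvMergeCount t1 (q :: t2) := by
      simp [pvMergeCount, hne, hlt]
    have hnm : p ∉ (↑(q :: t2) : Multiset (List Char)) := by
      rw [Multiset.mem_coe]
      intro hm
      rcases List.mem_cons.mp hm with rfl | hm2
      · exact hne rfl
      · have hle : q ≤ p := (List.pairwise_cons.mp h2).1 p hm2
        exact absurd hlt (not_lt.mpr hle)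
    rw [e, ih (List.Pairwise.sublist (List.sublist_cons_self p t1) h1) h2]
    rw [show ((↑(p :: t1) : Multiset (List Char))) = p ::ₘ ↑t1 from (Multiset.cons_coe p t1).symm,
        Multiset.cons_inter_of_neg _ hnm]
  | case5 p t1 q t2 hne hnlt ih =>
    have hqp : q < p := by
      rcases lt_trichotomy p q with h | h | h
      · exact absurd h hnlt
      · exact absurd h hne
      · exact h
    have e : pvMergeCount (p :: t1) (q :: t2) = pvMergeCount (p :: t1) t2 := by
      simp [pvMergeCount, hne, hnlt]
    have hnm : q ∉ (↑(p :: t1) : Multiset (List Char)) := by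
      rw [Multiset.mem_coe]
      intro hm
      rcases List.mem_cons.mp hm with rfl | hm2
      · exact absurd hqp (lt_irrefl _)
      · have hle : p ≤ q := (List.pairwise_cons.mp h1).1 q hm2
        exact absurd hqp (not_lt.mpr hle)
    have hmeq : ((↑(p :: t1) : Multiset (List Char)) ∩ ↑(q :: t2))
        = (↑(p :: t1) : Multiset (List Char)) ∩ ↑t2 := by
      rw [Multiset.inter_comm,
          show ((↑(q :: t2) : Multiset (List Char))) = q ::ₘ ↑t2 from (Multiset.cons_coe q t2).symm,
          Multiset.cons_inter_of_neg _ hnm, Multiset.inter_comm]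
    rw [e, ih h1 (List.Pairwise.sublist (List.sublist_cons_self q t2) h2), hmeq]

-- ===== VERDICT (by name: the statement is the Claim_ definition above) =====
theorem solution_spec : Claim_equal_solution := by
  intro str1 str2 _
  unfold Spec_solution
  simp only [solution, solution_alt]
  rw [pvCount_eq_counter, pvCount_eq_counter]
  set L1 := pvBigrams str1.toList with hL1
  set L2 := pvBigrams str2.toList with hL2
  rw [pvJakard_eq _ _ (PySem.Dict.nodup_keys_counter L1) (PySem.Dict.nodup_keys_counter L2)
        (pv_counter_get?_pos L1) (pv_counter_get?_pos L2)]
  rw [pv_counter_inter_sum, pv_counter_values_sum, pv_counter_values_sum]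
  -- B's side
  have hp1 := PySem.List.sorted_perm L1 (fun x => x) false
  have hp2 := PySem.List.sorted_perm L2 (fun x => x) false
  have hpw1 : (PySem.List.sorted L1 (fun x => x) false).Pairwise (· ≤ ·) := by
    rw [pv_sorted_irrel]; exact PySem.List.sorted_pairwise L1 (fun x => x)
  have hpw2 : (PySem.List.sorted L2 (fun x => x) false).Pairwise (· ≤ ·) := by
    rw [pv_sorted_irrel]; exact PySem.List.sorted_pairwise L2 (fun x => x)
  have hm : pvMergeCount (PySem.List.sorted L1 (fun x => x) false)
        (PySem.List.sorted L2 (fun x => x) false)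
      = (((↑L1 : Multiset (List Char)) ∩ ↑L2).card : Int) := by
    rw [pv_merge_card _ _ hpw1 hpw2]
    rw [Multiset.coe_eq_coe.mpr hp1, Multiset.coe_eq_coe.mpr hp2]
  rw [hm, PySem.List.len_eq, PySem.List.len_eq, hp1.length_eq, hp2.length_eq]
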